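-- pv_equiv track=rewrite | github.com/stvsever/ThesisMaster | utils/official/ontology_mappings/CRITERION/predictor_to_criterion/utils/01_compute_predictor_list.py | build_prefix_to_leaves
-- ===== SOURCE A (Python) =====
-- from collections import defaultdict
-- from typing import Any, Dict, List, Tuple
--
-- def build_prefix_to_leaves(
--     paths: List[List[str]],
--     target_level: int
-- ) -> Dict[Tuple[str, ...], List[str]]:
--     """
--     For paths of length == target_level:
--       prefix = tuple(path[:-1])  # ancestors only
--       leaf   = path[-1]
--
--     Returns:
--       mapping[prefix] = sorted unique leaves
--
--     Example for target_level=4: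
--       prefix = (L1, L2, L3)
--       leaves = [L4a, L4b, ...]
--     """
--     mapping: Dict[Tuple[str, ...], List[str]] = defaultdict(list)
--
--     for p in paths:
--         if len(p) != target_level:
--             continue
--         prefix = tuple(p[:-1])
--         leaf = p[-1]
--         mapping[prefix].append(leaf)
--
--     for prefix in list(mapping.keys()):
--         mapping[prefix] = sorted(set(mapping[prefix]))
--
--     return mapping
-- ===== SOURCE B (Python) =====
-- def build_prefix_to_leaves(paths, target_level):
--     # One pass: each bucket is kept sorted and duplicate-free incrementally,
--     # so no set() materialisation and no second sorting pass are needed.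
--     mapping = {}
--     for p in paths:
--         if len(p) == target_level:
--             prefix = tuple(p[:-1])
--             leaf = p[-1]
--             bucket = mapping.setdefault(prefix, [])
--             i = 0
--             while i < len(bucket) and bucket[i] < leaf:
--                 i += 1
--             if i == len(bucket) or bucket[i] != leaf:
--                 bucket.insert(i, leaf)
--     return mapping
-- ===== Notes on version B (the rewrite author's own statement) =====
-- stated objective: alternative
-- what changed: Instead of bucketing raw leaves into a defaultdict and then running a second pass that replaces each bucket with sorted(set(bucket)), B makes a single pass that keeps every bucket sorted and duplicate-free at all times via an in-place ordered insertion that skips duplicates.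
import Mathlib
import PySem

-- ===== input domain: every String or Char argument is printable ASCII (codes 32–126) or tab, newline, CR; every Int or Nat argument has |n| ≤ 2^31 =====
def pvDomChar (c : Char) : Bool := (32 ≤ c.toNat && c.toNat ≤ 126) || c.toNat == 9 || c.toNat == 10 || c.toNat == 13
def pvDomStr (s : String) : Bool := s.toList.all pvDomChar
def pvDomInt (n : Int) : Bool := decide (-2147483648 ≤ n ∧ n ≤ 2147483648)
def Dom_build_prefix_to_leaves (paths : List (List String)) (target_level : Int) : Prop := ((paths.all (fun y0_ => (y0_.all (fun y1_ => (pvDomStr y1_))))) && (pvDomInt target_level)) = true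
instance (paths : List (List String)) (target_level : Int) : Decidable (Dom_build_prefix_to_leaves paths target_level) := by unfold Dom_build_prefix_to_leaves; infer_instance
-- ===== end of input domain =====

-- B replaces A's bucket-then-sorted(set(...)) second pass by a single pass that keeps each
-- bucket sorted and duplicate-free via ordered insertion. (objective: alternative)

-- ===== PORT A =====
def build_prefix_to_leaves (paths : List (List String)) (target_level : Int) : List (List String × List String) :=
  let mapping : PySem.Dict (List String) (List String) :=
    paths.foldl (fun d p =>
      if PySem.List.len p ≠ target_level then d
      else d.modify (PySem.List.slice p none (some (-1))) []
             (fun b => b ++ [PySem.List.pyGetD p (-1) ""])) PySem.Dict.empty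
  -- for prefix in list(mapping.keys()): mapping[prefix] = sorted(set(mapping[prefix]))
  let mapping2 := mapping.keys.foldl (fun d k =>
      d.insert k (PySem.List.sorted (PySem.Set.ofList (d.getD k [])) (fun x => x) false)) mapping
  mapping2.items

-- ===== PORT B =====
-- hand port of B's while-scan + insert: walk past smaller leaves, skip an equal one, insert otherwise
def pvInsLeaf : List String → String → List String
  | [], x => [x]
  | y :: ys, x => if y < x then y :: pvInsLeaf ys x else if y = x then y :: ys else x :: y :: ys

def build_prefix_to_leaves_alt (paths : List (List String)) (target_level : Int) : List (List String × List String) :=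
  (paths.foldl (fun d p =>
      if PySem.List.len p = target_level then
        d.modify (PySem.List.slice p none (some (-1))) []
          (fun b => pvInsLeaf b (PySem.List.pyGetD p (-1) ""))
      else d) (PySem.Dict.empty : PySem.Dict (List String) (List String))).items

-- ===== PRECONDITION & SPEC =====
-- Pre_ excludes exactly the inputs where A raises IndexError (p[-1] on the empty path,
-- reachable only when target_level = 0 and [] ∈ paths); B raises there too.
def Pre_build_prefix_to_leaves (paths : List (List String)) (target_level : Int) : Prop :=
  ¬ (target_level = 0 ∧ [] ∈ paths)
instance (paths : List (List String)) (target_level : Int) : Decidable (Pre_build_prefix_to_leaves paths target_level) := by unfold Pre_build_prefix_to_leaves; infer_instance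

def pvWitness_build_prefix_to_leaves : List (List String) × Int := ([["a", "b"], ["a", "c"], ["a", "b"], ["x"]], 2)

def Spec_build_prefix_to_leaves (paths : List (List String)) (target_level : Int) (out : List (List String × List String)) : Prop := out = build_prefix_to_leaves_alt paths target_level
instance (paths : List (List String)) (target_level : Int) (out : List (List String × List String)) : Decidable (Spec_build_prefix_to_leaves paths target_level out) := by unfold Spec_build_prefix_to_leaves; infer_instance

-- ===== CLAIM (what is proved, stated in full; the proofs are below) =====
def Claim_equal_build_prefix_to_leaves : Prop := ∀ (paths : List (List String)) (target_level : Int), Dom_build_prefix_to_leaves paths target_level → Pre_build_prefix_to_leaves paths target_level → Spec_build_prefix_to_leaves paths target_level (build_prefix_to_leaves paths target_level)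

-- ===== LEMMAS AND PROOFS =====

theorem mem_pvInsLeaf (l : List String) (x z : String) :
    z ∈ pvInsLeaf l x ↔ z = x ∨ z ∈ l := by
  induction l with
  | nil => simp [pvInsLeaf]
  | cons y ys ih =>
      simp only [pvInsLeaf]
      split_ifs with h1 h2
      · rw [List.mem_cons, ih, List.mem_cons]; tauto
      · subst h2; rw [List.mem_cons]; tauto
      · rw [List.mem_cons, List.mem_cons]

theorem pairwise_pvInsLeaf (l : List String) (x : String)
    (h : l.Pairwise (· < ·)) : (pvInsLeaf l x).Pairwise (· < ·) := by
  induction l with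
  | nil => simp [pvInsLeaf]
  | cons y ys ih =>
      rcases List.pairwise_cons.mp h with ⟨hy, hys⟩
      simp only [pvInsLeaf]
      split_ifs with h1 h2
      · refine List.pairwise_cons.mpr ⟨?_, ih hys⟩
        intro z hz
        rcases (mem_pvInsLeaf ys x z).mp hz with rfl | hz
        · exact h1
        · exact hy z hz
      · exact h
      · have hxy : x < y := lt_of_le_of_ne (le_of_not_gt h1) (Ne.symm h2)
        refine List.pairwise_cons.mpr ⟨?_, h⟩
        intro z hz
        rcases List.mem_cons.mp hz with rfl | hz
        · exact hxy
        · exact hxy.trans (hy z hz)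

theorem set_add_of_mem {s : List String} {x : String} (h : x ∈ s) :
    PySem.Set.add s x = s := by
  simp [PySem.Set.add, h]

theorem set_add_of_not_mem {s : List String} {x : String} (h : x ∉ s) :
    PySem.Set.add s x = s ++ [x] := by
  simp [PySem.Set.add, h]

theorem pvInsLeaf_eq_of_mem {l : List String} {x : String}
    (h : l.Pairwise (· < ·)) (hmem : x ∈ l) : pvInsLeaf l x = l := by
  induction l with
  | nil => cases hmem
  | cons y ys ih =>
      rcases List.pairwise_cons.mp h with ⟨hy, hys⟩
      simp only [pvInsLeaf]
      split_ifs with h1 h2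
      · have hne : x ≠ y := fun he => absurd (he ▸ h1) (lt_irrefl x)
        have : x ∈ ys := (List.mem_cons.mp hmem).resolve_left hne
        rw [ih hys this]
      · rfl
      · exfalso
        have hxy : x < y := lt_of_le_of_ne (le_of_not_gt h1) (Ne.symm h2)
        rcases List.mem_cons.mp hmem with rfl | hm
        · exact lt_irrefl x hxy
        · exact absurd (hxy.trans (hy x hm)) (lt_irrefl x)

theorem pvInsLeaf_perm_append {l : List String} {x : String} (hmem : x ∉ l) :
    (pvInsLeaf l x).Perm (l ++ [x]) := by
  induction l with
  | nil => simp [pvInsLeaf]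
  | cons y ys ih =>
      have hne : x ≠ y := fun he => hmem (he ▸ List.mem_cons_self ..)
      simp only [pvInsLeaf]
      split_ifs with h1 h2
      · exact (ih (fun hm => hmem (List.mem_cons_of_mem y hm))).cons y
      · exact absurd h2.symm hne
      · exact (List.perm_append_singleton x (y :: ys)).symm

theorem pvInsLeaf_perm_add (l : List String) (x : String)
    (h : l.Pairwise (· < ·)) : (pvInsLeaf l x).Perm (PySem.Set.add l x) := by
  by_cases hmem : x ∈ l
  · rw [pvInsLeaf_eq_of_mem h hmem, set_add_of_mem hmem]
  · rw [set_add_of_not_mem hmem]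
    exact pvInsLeaf_perm_append hmem

theorem perm_foldl_setadd (v : List String) (a b : List String) (hab : a.Perm b) :
    (v.foldl PySem.Set.add a).Perm (v.foldl PySem.Set.add b) := by
  induction v generalizing a b with
  | nil => simpa using hab
  | cons x xs ih =>
      simp only [List.foldl_cons]
      apply ih
      by_cases hmem : x ∈ a
      · rw [set_add_of_mem hmem, set_add_of_mem (hab.mem_iff.mp hmem)]
        exact hab
      · rw [set_add_of_not_mem hmem, set_add_of_not_mem (fun hb => hmem (hab.mem_iff.mpr hb))]
        exact hab.append_right [x]

theorem foldl_pvInsLeaf_spec (v : List String) (acc : List String)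
    (h : acc.Pairwise (· < ·)) :
    (v.foldl pvInsLeaf acc).Pairwise (· < ·) ∧
      (v.foldl pvInsLeaf acc).Perm (v.foldl PySem.Set.add acc) := by
  induction v generalizing acc with
  | nil => exact ⟨h, List.Perm.refl _⟩
  | cons x xs ih =>
      simp only [List.foldl_cons]
      have h' := pairwise_pvInsLeaf acc x h
      obtain ⟨hp, hperm⟩ := ih _ h'
      exact ⟨hp, hperm.trans (perm_foldl_setadd xs _ _ (pvInsLeaf_perm_add acc x h))⟩

-- sorted(set(v)) equals B's incremental ordered-insert fold
theorem sortedSet_eq_foldl_pvInsLeaf (v : List String) :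
    PySem.List.sorted (PySem.Set.ofList v) (fun x => x) false = v.foldl pvInsLeaf [] := by
  obtain ⟨hp, hperm⟩ := foldl_pvInsLeaf_spec v [] List.Pairwise.nil
  refine PySem.List.sorted_eq_of_perm_of_pairwise_lt _ _ _ ?_ hp
  exact hperm.trans (by rw [PySem.Set.ofList_eq_foldl])

-- second pass of A: each key of ks gets g applied to its bucket, once
theorem secondpass_getD (g : List String → List String) (ks : List (List String)) :
    ∀ (d : PySem.Dict (List String) (List String)), ks.Nodup → ∀ k,
    (ks.foldl (fun d k => d.insert k (g (d.getD k []))) d).getD k [] =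
      if k ∈ ks then g (d.getD k []) else d.getD k [] := by
  induction ks with
  | nil => intro d _ k; simp
  | cons k0 ks ih =>
      intro d hnd k
      rcases List.nodup_cons.mp hnd with ⟨hk0, hnd'⟩
      simp only [List.foldl_cons]
      rw [ih _ hnd' k]
      by_cases hk : k ∈ ks
      · have hne : k ≠ k0 := fun he => hk0 (he ▸ hk)
        simp [hk, PySem.Dict.getD_insert, hne]
      · by_cases he : k = k0
        · subst he; simp [hk, PySem.Dict.getD_insert_self]
        · simp [hk, he, PySem.Dict.getD_insert]

theorem secondpass_keys (g : List String → List String)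
    (ks : List (List String)) :
    ∀ (d : PySem.Dict (List String) (List String)), (∀ k ∈ ks, k ∈ d.keys) →
    (ks.foldl (fun d k => d.insert k (g (d.getD k []))) d).keys = d.keys := by
  induction ks with
  | nil => intro d _; rfl
  | cons k0 ks ih =>
      intro d h
      simp only [List.foldl_cons]
      have hkeq : (d.insert k0 (g (d.getD k0 []))).keys = d.keys :=
        PySem.Dict.keys_insert_of_contains _ _
          ((PySem.Dict.contains_iff_mem_keys _ _).mpr (h k0 (by simp)))
      rw [ih _ (fun k hk => by rw [hkeq]; exact h k (by simp [hk])), hkeq]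

-- B's fold per key: the bucket at k is the insLeaf-fold of the leaves whose prefix is k
theorem getD_foldl_modify_pvInsLeaf (q : List (List String × String)) :
    ∀ (d : PySem.Dict (List String) (List String)) (k : List String),
    (q.foldl (fun d p => d.modify p.1 [] (fun b => pvInsLeaf b p.2)) d).getD k [] =
      ((q.filter (fun p => p.1 == k)).map Prod.snd).foldl pvInsLeaf (d.getD k []) := by
  induction q with
  | nil => intro d k; simp
  | cons p ps ih =>
      intro d k
      simp only [List.foldl_cons, List.filter_cons]
      by_cases he : p.1 = k
      · simp only [he, beq_self_eq_true, if_true, List.map_cons, List.foldl_cons, ih]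
        rw [← he, PySem.Dict.getD_modify_self]
      · have hb : (p.1 == k) = false := by simpa using he
        simp only [hb, Bool.false_eq_true, if_false, ih]
        rw [PySem.Dict.getD_modify_of_ne _ _ _ (Ne.symm he)]

-- the common pair list both folds traverse
def pvPairs (paths : List (List String)) (target_level : Int) : List (List String × String) :=
  (paths.filter (fun p => decide (PySem.List.len p = target_level))).map
    (fun p => (PySem.List.slice p none (some (-1)), PySem.List.pyGetD p (-1) ""))

theorem dictA_eq (paths : List (List String)) (target_level : Int) :
    paths.foldl (fun d p =>
      if PySem.List.len p ≠ target_level then d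
      else d.modify (PySem.List.slice p none (some (-1))) []
             (fun b => b ++ [PySem.List.pyGetD p (-1) ""])) PySem.Dict.empty =
    (pvPairs paths target_level).foldl
      (fun d p => d.modify p.1 [] (fun b => b ++ [p.2])) PySem.Dict.empty := by
  unfold pvPairs
  rw [List.foldl_map]
  rw [← PySem.List.foldl_ite_eq_foldl_filter (p := fun p => PySem.List.len p = target_level)]
  apply PySem.List.foldl_congr_mem
  intro acc x _
  simp only [ne_eq, ite_not]

theorem dictB_eq (paths : List (List String)) (target_level : Int) :
    paths.foldl (fun d p =>
      if PySem.List.len p = target_level then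
        d.modify (PySem.List.slice p none (some (-1))) []
          (fun b => pvInsLeaf b (PySem.List.pyGetD p (-1) ""))
      else d) PySem.Dict.empty =
    (pvPairs paths target_level).foldl
      (fun d p => d.modify p.1 [] (fun b => pvInsLeaf b p.2)) PySem.Dict.empty := by
  unfold pvPairs
  rw [List.foldl_map]
  rw [← PySem.List.foldl_ite_eq_foldl_filter (p := fun p => PySem.List.len p = target_level)]

-- ===== VERDICT (by name: the statement is the Claim_ definition above) =====
theorem build_prefix_to_leaves_spec : Claim_equal_build_prefix_to_leaves := by
  intro paths target_level _ _
  unfold Spec_build_prefix_to_leaves build_prefix_to_leaves build_prefix_to_leaves_alt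
  rw [dictA_eq, dictB_eq]
  set q := pvPairs paths target_level with hq
  set g : List String → List String :=
    fun v => PySem.List.sorted (PySem.Set.ofList v) (fun x => x) false with hg
  set dA := q.foldl (fun d p => d.modify p.1 [] (fun b => b ++ [p.2])) PySem.Dict.empty with hdA
  set dB := q.foldl (fun d p => d.modify p.1 [] (fun b => pvInsLeaf b p.2)) PySem.Dict.empty with hdB
  have hkA : dA.keys = PySem.Set.update (PySem.Dict.empty : PySem.Dict (List String) (List String)).keys (q.map Prod.fst) := by
    rw [hdA]
    exact PySem.Dict.keys_foldl_modify_key q Prod.fst [] (fun _ p => fun b => b ++ [p.2]) _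
  have hkB : dB.keys = PySem.Set.update (PySem.Dict.empty : PySem.Dict (List String) (List String)).keys (q.map Prod.fst) := by
    rw [hdB]
    exact PySem.Dict.keys_foldl_modify_key q Prod.fst [] (fun _ p => fun b => pvInsLeaf b p.2) _
  have hkeys : dA.keys = dB.keys := by rw [hkA, hkB]
  have hndA : dA.keys.Nodup := by
    rw [hdA]
    exact PySem.Dict.nodup_keys_foldl_modify_key q Prod.fst [] _ _ (by simp)
  have hndB : dB.keys.Nodup := by rw [← hkeys]; exact hndA
  show (dA.keys.foldl (fun d k => d.insert k (g (d.getD k []))) dA).items = dB.items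
  have hfinal_keys :
      (dA.keys.foldl (fun d k => d.insert k (g (d.getD k []))) dA).keys = dA.keys :=
    secondpass_keys g dA.keys dA (fun k hk => hk)
  have hndF : (dA.keys.foldl (fun d k => d.insert k (g (d.getD k []))) dA).keys.Nodup := by
    rw [hfinal_keys]; exact hndA
  rw [PySem.Dict.items_eq_map_keys _ hndF [], PySem.Dict.items_eq_map_keys _ hndB [],
      hfinal_keys, ← hkeys]
  apply List.map_congr_left
  intro k hk
  have hgetF := secondpass_getD g dA.keys dA hndA k
  rw [if_pos hk] at hgetF
  rw [hgetF]
  have hA : dA.getD k [] = (q.filter (fun p => p.1 == k)).map (fun x => x.2) := by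
    rw [hdA, PySem.Dict.getD_foldl_modify_append]
    simp
  have hB : dB.getD k [] =
      ((q.filter (fun p => p.1 == k)).map Prod.snd).foldl pvInsLeaf [] := by
    rw [hdB, getD_foldl_modify_pvInsLeaf]
    simp
  rw [hA, hB, hg]
  simp only []
  rw [sortedSet_eq_foldl_pvInsLeaf]
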